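-- pv_equiv track=rewrite | github.com/GowdhamanBJ-7/python-assignment | src/pilling_up/utils.py | can_stack
-- ===== SOURCE A (Python) =====
-- from collections import deque
--
-- def can_stack(cubes):
--     dq = deque(cubes)
--     top = float('inf')
--
--     while dq:
--         if dq[0] >= dq[-1]:
--             pick = dq.popleft()
--         else:
--             pick = dq.pop()
--
--         if pick > top:
--             return "No"
--         top = pick
--
--     return "Yes"
-- ===== SOURCE B (Python) =====
-- def can_stack(cubes):
--     # One forward pass: the stacking succeeds iff the sequence is a "valley" --
--     # a non-increasing prefix followed by a non-decreasing suffix.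
--     descending = True
--     prev = None
--     for x in cubes:
--         if prev is not None:
--             if descending:
--                 if prev < x:
--                     descending = False
--             elif prev > x:
--                 return "No"
--         prev = x
--     return "Yes"
-- ===== Notes on version B (the rewrite author's own statement) =====
-- stated objective: simpler
-- what changed: B replaces A's step-by-step two-end deque removal simulation with a single forward pass over the list that checks the valley property (non-increasing prefix followed by non-decreasing suffix).
import Mathlib
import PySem

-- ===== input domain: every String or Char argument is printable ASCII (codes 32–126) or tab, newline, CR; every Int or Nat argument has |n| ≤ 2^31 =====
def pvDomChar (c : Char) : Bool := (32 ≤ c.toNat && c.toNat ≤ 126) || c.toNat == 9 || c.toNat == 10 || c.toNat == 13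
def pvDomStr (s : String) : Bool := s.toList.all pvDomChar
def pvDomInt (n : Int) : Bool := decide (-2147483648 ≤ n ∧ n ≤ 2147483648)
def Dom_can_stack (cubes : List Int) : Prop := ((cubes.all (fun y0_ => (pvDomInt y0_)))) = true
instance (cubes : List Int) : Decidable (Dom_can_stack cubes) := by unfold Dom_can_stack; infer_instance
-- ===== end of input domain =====

-- B replaces A's two-end deque-removal simulation by a single forward "valley" scan (simpler; a timing run measured a constant-factor speedup).

-- ===== PORT A =====
-- A's `top` starts at float('inf'); ported as `Option Int` with `none` = infinity
-- (`pick > float('inf')` is always false for Python ints, exactly the `none` branch here).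
def canStackLoop : List Int → Option Int → String
  | [], _ => "Yes"
  | x :: xs, top =>
      let lst := (x :: xs).getLast (by simp)
      if x ≥ lst then
        -- pick = dq.popleft()
        if (match top with | some t => decide (x > t) | none => false) then "No"
        else canStackLoop xs (some x)
      else
        -- pick = dq.pop()
        if (match top with | some t => decide (lst > t) | none => false) then "No"
        else canStackLoop ((x :: xs).dropLast) (some lst)
termination_by l _ => l.length
decreasing_by
  · simp
  · simp

def can_stack (cubes : List Int) : String := canStackLoop cubes none

-- ===== PORT B =====
-- one forward pass; state = previous element (None before the first one) and the phase flag
def goB : List Int → Option Int → Bool → String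
  | [], _, _ => "Yes"
  | x :: rest, prev, descending =>
      match prev with
      | none => goB rest (some x) descending
      | some p =>
        if descending then
          if p < x then goB rest (some x) false
          else goB rest (some x) true
        else if p > x then "No"
        else goB rest (some x) descending

def can_stack_alt (cubes : List Int) : String := goB cubes none true

-- ===== PRECONDITION & SPEC =====
def Spec_can_stack (cubes : List Int) (out : String) : Prop := out = can_stack_alt cubes
instance (cubes : List Int) (out : String) : Decidable (Spec_can_stack cubes out) := by unfold Spec_can_stack; infer_instance

-- ===== CLAIM (what is proved, stated in full; the proofs are below) =====
def Claim_equal_can_stack : Prop := ∀ (cubes : List Int), Dom_can_stack cubes → Spec_can_stack cubes (can_stack cubes)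

-- ===== LEMMAS AND PROOFS =====

/-- the valley property: a non-increasing prefix followed by a non-decreasing suffix -/
def Valley (l : List Int) : Prop :=
  ∃ d u, l = d ++ u ∧ List.IsChain (· ≥ ·) d ∧ List.IsChain (· ≤ ·) u

theorem valley_nil : Valley [] := ⟨[], [], rfl, List.isChain_nil, List.isChain_nil⟩

theorem valley_singleton (a : Int) : Valley [a] := ⟨[a], [], rfl, List.isChain_singleton a, List.isChain_nil⟩

theorem valley_cons_ge {p x : Int} {rest : List Int} (h : x ≤ p) :
    Valley (p :: x :: rest) ↔ Valley (x :: rest) := by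
  constructor
  · rintro ⟨d, u, heq, hd, hu⟩
    cases d with
    | nil =>
      exact ⟨[], x :: rest, rfl, List.isChain_nil, by
        simp only [List.nil_append] at heq
        exact (heq ▸ hu).tail⟩
    | cons a d' =>
      simp only [List.cons_append, List.cons.injEq] at heq
      exact ⟨d', u, heq.2, hd.tail, hu⟩
  · rintro ⟨d, u, heq, hd, hu⟩
    cases d with
    | nil =>
      simp only [List.nil_append] at heq
      exact ⟨[p], u, by simp [← heq], List.isChain_singleton p, hu⟩
    | cons a d' =>
      simp only [List.cons_append, List.cons.injEq] at heq
      obtain ⟨rfl, hrest⟩ := heq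
      exact ⟨p :: x :: d', u, by simp [hrest], List.isChain_cons_cons.mpr ⟨h, hd⟩, hu⟩

theorem valley_cons_lt {p x : Int} {rest : List Int} (h : p < x) :
    Valley (p :: x :: rest) ↔ List.IsChain (· ≤ ·) (x :: rest) := by
  constructor
  · rintro ⟨d, u, heq, hd, hu⟩
    match d, heq with
    | [], heq =>
      simp only [List.nil_append] at heq
      exact (heq ▸ hu).tail
    | [a], heq =>
      simp only [List.cons_append, List.nil_append, List.cons.injEq] at heq
      exact heq.2 ▸ hu
    | a :: b :: d', heq =>
      simp only [List.cons_append, List.cons.injEq] at heq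
      obtain ⟨rfl, rfl, -⟩ := heq
      have := (List.isChain_cons_cons.mp hd).1
      omega
  · intro hu
    exact ⟨[p], x :: rest, rfl, List.isChain_singleton p, hu⟩

theorem chain'_le_head_getLast {x : Int} {r : List Int} (h : List.IsChain (· ≤ ·) (x :: r)) :
    x ≤ (x :: r).getLast (by simp) := by
  induction r generalizing x with
  | nil => simp
  | cons y r' ih =>
    have h1 := (List.isChain_cons_cons.mp h).1
    have h2 := ih (List.isChain_cons_cons.mp h).2
    calc x ≤ y := h1
      _ ≤ (y :: r').getLast (by simp) := h2
      _ = ((x :: y :: r').getLast (by simp)) := (List.getLast_cons (by simp)).symm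

/-- core: prepending a value dominating the last element -/
theorem valley_cons_of_last {f : Int} {l : List Int} (hne : l ≠ [])
    (h : l.getLast hne ≤ f) :
    Valley (f :: l) ↔ Valley l ∧ l.head hne ≤ f := by
  match l, hne with
  | x :: r, _ =>
    by_cases hfx : x ≤ f
    · simp only [List.head_cons, hfx, and_true, valley_cons_ge hfx]
    · rw [not_le] at hfx
      rw [valley_cons_lt hfx]
      simp only [List.head_cons]
      constructor
      · intro hu
        have := chain'_le_head_getLast hu
        omega
      · intro ⟨_, hc⟩; omega

theorem valley_reverse (l : List Int) : Valley l.reverse ↔ Valley l := by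
  have key : ∀ (m : List Int), Valley m → Valley m.reverse := by
    rintro m ⟨d, u, heq, hd, hu⟩
    refine ⟨u.reverse, d.reverse, by simp [heq], ?_, ?_⟩
    · rw [List.isChain_reverse]; exact hu
    · rw [List.isChain_reverse]; exact hd
  constructor
  · intro h; have := key _ h; simpa using this
  · exact key l

/-- the constraint `top` places on the next pick -/
def TopOK (dq : List Int) (top : Option Int) : Prop :=
  ∀ t, top = some t → ∀ (h : dq ≠ []), max (dq.head h) (dq.getLast h) ≤ t

theorem canStackLoop_yes (dq : List Int) (top : Option Int) :
    canStackLoop dq top = "Yes" ↔ (Valley dq ∧ TopOK dq top) := by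
  fun_induction canStackLoop dq top with
  | case1 top =>
    constructor
    · intro _; exact ⟨valley_nil, by intro t _ h; exact absurd rfl h⟩
    · intro _; rfl
  | case2 x xs top lst hge hbad =>
    constructor
    · intro h; simp at h
    · rintro ⟨-, htop⟩
      match top, hbad with
      | some t, hbad =>
        have hx : x > t := by simpa using hbad
        have := htop t rfl (by simp)
        simp only [List.head_cons] at this
        omega
  | case3 x xs top lst hge hok ih =>
    rw [ih]
    have hxt : ∀ t, top = some t → x ≤ t := by
      intro t ht
      subst ht
      simpa using hok
    cases xs with
    | nil =>
      simp only [valley_nil, valley_singleton, true_and]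
      constructor
      · intro _ t ht h
        simp only [List.head_cons, List.getLast_singleton, max_self]
        exact hxt t ht
      · intro _ t ht h
        exact absurd rfl h
    | cons y r =>
      have hlst : lst = (y :: r).getLast (by simp) := List.getLast_cons (by simp)
      have hle : (y :: r).getLast (by simp) ≤ x := hlst ▸ hge
      rw [valley_cons_of_last (l := y :: r) (by simp) hle]
      constructor
      · rintro ⟨hv, htop⟩
        have hmax := htop x rfl (by simp)
        refine ⟨⟨hv, le_trans (le_max_left _ _) hmax⟩, ?_⟩
        intro t ht h
        have h1 := hxt t ht
        simp only [List.head_cons]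
        rw [List.getLast_cons (by simp), ← hlst]
        exact max_le h1 (le_trans hge h1)
      · rintro ⟨⟨hv, hhd⟩, -⟩
        refine ⟨hv, ?_⟩
        intro t ht h
        obtain rfl : x = t := by injection ht
        exact max_le hhd hle
  | case4 x xs top lst hlt hbad =>
    constructor
    · intro h; simp at h
    · rintro ⟨-, htop⟩
      match top, hbad with
      | some t, hbad =>
        have hx : lst > t := by simpa using hbad
        have := htop t rfl (by simp)
        have hl : (x :: xs).getLast (by simp) = lst := rfl
        rw [hl] at this
        omega
  | case5 x xs top lst hlt hok ih =>
    rw [ih]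
    have hne : (x :: xs).dropLast ≠ [] := by
      cases xs with
      | nil => simp [show lst = x from rfl] at hlt
      | cons y r => simp
    have hsplit : (x :: xs).dropLast ++ [lst] = x :: xs := List.dropLast_concat_getLast (by simp)
    have hhd : ((x :: xs).dropLast).head hne = x := by
      cases xs with
      | nil => simp [show lst = x from rfl] at hlt
      | cons y r => simp
    have hlstt : ∀ t, top = some t → lst ≤ t := by
      intro t ht; subst ht; simpa using hok
    have hrne : ((x :: xs).dropLast).reverse ≠ [] := by simpa using hne
    have hgl : (((x :: xs).dropLast).reverse).getLast (by simpa using hne) ≤ lst := by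
      rw [List.getLast_reverse, hhd]
      omega
    -- Valley (x :: xs) ↔ Valley dropLast ∧ getLast dropLast ≤ lst, via reversal
    have hrev : Valley (x :: xs) ↔
        Valley ((x :: xs).dropLast) ∧ ((x :: xs).dropLast).getLast hne ≤ lst := by
      conv_lhs => rw [← hsplit]
      rw [← valley_reverse ((x :: xs).dropLast ++ [lst])]
      have e : ((x :: xs).dropLast ++ [lst]).reverse = lst :: ((x :: xs).dropLast).reverse := by
        simp
      rw [e, valley_cons_of_last hrne hgl, List.head_reverse, valley_reverse]
    rw [hrev]
    constructor
    · rintro ⟨hv, htop⟩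
      have hmax := htop lst rfl hne
      rw [hhd] at hmax
      refine ⟨⟨hv, le_trans (le_max_right _ _) hmax⟩, ?_⟩
      intro t ht h
      have h1 := hlstt t ht
      simp only [List.head_cons]
      have hl : (x :: xs).getLast (by simp) = lst := rfl
      rw [hl]
      exact max_le (le_trans (le_of_lt (lt_of_not_ge hlt)) h1) h1
    · rintro ⟨⟨hv, hgl2⟩, -⟩
      refine ⟨hv, ?_⟩
      intro t ht h
      obtain rfl : lst = t := by injection ht
      rw [hhd]
      exact max_le (le_of_lt (lt_of_not_ge hlt)) hgl2

theorem canStackLoop_out (dq : List Int) (top : Option Int) :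
    canStackLoop dq top = "Yes" ∨ canStackLoop dq top = "No" := by
  fun_induction canStackLoop dq top with
  | case1 _ => left; rfl
  | case2 _ _ _ _ _ _ => right; rfl
  | case3 _ _ _ _ _ _ ih => exact ih
  | case4 _ _ _ _ _ _ => right; rfl
  | case5 _ _ _ _ _ _ ih => exact ih

theorem goB_out (l : List Int) (prev : Option Int) (desc : Bool) :
    goB l prev desc = "Yes" ∨ goB l prev desc = "No" := by
  induction l generalizing prev desc with
  | nil => left; rfl
  | cons x rest ih =>
    cases prev with
    | none => exact ih (some x) desc
    | some p =>
      by_cases hd : desc = true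
      · subst hd
        simp only [goB, if_true]
        split
        · exact ih (some x) false
        · exact ih (some x) true
      · have hd' : desc = false := by revert hd; cases desc <;> simp
        subst hd'
        simp only [goB, Bool.false_eq_true, if_false]
        split
        · right; rfl
        · exact ih (some x) false

theorem goB_up (l : List Int) (p : Int) :
    goB l (some p) false = "Yes" ↔ List.IsChain (· ≤ ·) (p :: l) := by
  induction l generalizing p with
  | nil => simp [goB]
  | cons x rest ih =>
    simp only [goB, Bool.false_eq_true, if_false]
    by_cases hpx : p > x
    · rw [if_pos hpx]
      constructor
      · intro h; simp at h
      · intro h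
        have := (List.isChain_cons_cons.mp h).1
        omega
    · rw [if_neg hpx, ih, List.isChain_cons_cons]
      constructor
      · intro h; exact ⟨by omega, h⟩
      · intro ⟨_, h⟩; exact h

theorem goB_valley (l : List Int) (p : Int) :
    goB l (some p) true = "Yes" ↔ Valley (p :: l) := by
  induction l generalizing p with
  | nil =>
    constructor
    · intro _; exact valley_singleton p
    · intro _; rfl
  | cons x rest ih =>
    simp only [goB, if_true]
    by_cases hpx : p < x
    · rw [if_pos hpx, goB_up, valley_cons_lt hpx]
    · rw [if_neg hpx, ih, valley_cons_ge (by omega)]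

theorem alt_yes (cubes : List Int) : can_stack_alt cubes = "Yes" ↔ Valley cubes := by
  cases cubes with
  | nil =>
    constructor
    · intro _; exact valley_nil
    · intro _; rfl
  | cons c rest =>
    show goB rest (some c) true = "Yes" ↔ _
    exact goB_valley rest c

theorem a_yes (cubes : List Int) : can_stack cubes = "Yes" ↔ Valley cubes := by
  unfold can_stack
  rw [canStackLoop_yes]
  constructor
  · exact fun h => h.1
  · intro h
    exact ⟨h, by intro t ht; exact absurd ht (by simp)⟩

-- ===== VERDICT (by name: the statement is the Claim_ definition above) =====
theorem can_stack_spec : Claim_equal_can_stack := by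
  intro cubes _
  unfold Spec_can_stack
  by_cases hv : Valley cubes
  · rw [(a_yes cubes).mpr hv, (alt_yes cubes).mpr hv]
  · have hA : can_stack cubes = "No" := by
      rcases canStackLoop_out cubes none with h | h
      · exact absurd ((a_yes cubes).mp h) hv
      · exact h
    have hB : can_stack_alt cubes = "No" := by
      cases cubes with
      | nil => exact absurd valley_nil hv
      | cons c rest =>
        rcases goB_out rest (some c) true with h | h
        · exact absurd ((alt_yes (c :: rest)).mp h) hv
        · exact h
    rw [hA, hB]
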